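-- pv_equiv track=rewrite | github.com/franzenjb/NOSBeta | future_projects/extract_menu.py | categorize_menu_items
-- ===== SOURCE A (Python) =====
-- def categorize_menu_items(menu_items):
--     """Organize menu items by category"""
--     categories = {}
--
--     for item in menu_items:
--         category = item['category']
--         if category not in categories:
--             categories[category] = []
--         categories[category].append(item)
--
--     # Sort items within each category
--     for category in categories:
--         categories[category].sort(key=lambda x: x['name'])
--
--     return categories
-- ===== SOURCE B (Python) =====
-- def categorize_menu_items(menu_items):
--     """Organize menu items by category"""
--     # keys in first-appearance order, one global stable sort, one grouping pass
--     categories = {item['category']: [] for item in menu_items}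
--     for item in sorted(menu_items, key=lambda x: x['name']):
--         categories[item['category']].append(item)
--     return categories
-- ===== Notes on version B (the rewrite author's own statement) =====
-- stated objective: alternative
-- what changed: B replaces A's per-category in-place sorts with one global stable sort by name followed by a single grouping pass over the sorted list (keys pre-created in first-appearance order), relying on sort stability instead of N independent group sorts.
import Mathlib
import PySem

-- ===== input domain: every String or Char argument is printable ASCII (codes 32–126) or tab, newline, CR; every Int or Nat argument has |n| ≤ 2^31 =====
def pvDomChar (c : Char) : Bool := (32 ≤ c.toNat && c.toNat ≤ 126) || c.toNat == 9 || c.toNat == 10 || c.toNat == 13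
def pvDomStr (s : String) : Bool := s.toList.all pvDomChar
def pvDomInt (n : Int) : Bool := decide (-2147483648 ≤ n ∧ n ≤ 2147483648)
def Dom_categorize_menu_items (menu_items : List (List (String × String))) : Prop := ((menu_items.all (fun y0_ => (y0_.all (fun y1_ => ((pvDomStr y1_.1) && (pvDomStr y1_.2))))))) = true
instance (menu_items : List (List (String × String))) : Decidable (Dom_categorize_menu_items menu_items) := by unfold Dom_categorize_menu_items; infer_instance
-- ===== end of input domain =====

-- B replaces A's per-category in-place sorts by one global stable sort by name followed by a
-- single grouping pass (keys pre-created in first-appearance order); same return value.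

-- item[k] for an item dict; Pre_ guarantees the key is present (Python raises KeyError otherwise),
-- so the `""` default is never reached on admitted inputs.
def pvItemGet (item : List (String × String)) (k : String) : String :=
  ((PySem.Dict.mk item).get? k).getD ""

-- ===== PORT A =====
def categorize_menu_items (menu_items : List (List (String × String))) : List (String × List (List (String × String))) :=
  -- categories = {}; for item: if category not in categories: categories[category] = []; append
  -- then: for category in categories: categories[category].sort(key=lambda x: x['name'])
  (menu_items.foldl
      (fun d item =>
        let category := pvItemGet item "category"
        let d := if d.contains category then d else d.insert category []
        -- categories[category].append(item): key present here, so getD's [] default is unused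
        d.modify category [] (fun l => l ++ [item]))
      PySem.Dict.empty).items.map
    (fun p => (p.1, PySem.List.sorted p.2 (fun x => pvItemGet x "name") false))

-- ===== PORT B =====
def categorize_menu_items_alt (menu_items : List (List (String × String))) : List (String × List (List (String × String))) :=
  -- categories = {item['category']: [] for item in menu_items};
  -- for item in sorted(menu_items, key=lambda x: x['name']): categories[item['category']].append(item)
  ((PySem.List.sorted menu_items (fun x => pvItemGet x "name") false).foldl
      (fun d item => d.modify (pvItemGet item "category") [] (fun l => l ++ [item]))
      (menu_items.foldl (fun d item => d.insert (pvItemGet item "category") []) PySem.Dict.empty)).items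

-- ===== PRECONDITION & SPEC =====
-- Pre_ excludes exactly the inputs where the Python A raises KeyError: an item without a
-- 'category' key, or (when sorting) without a 'name' key.
def Pre_categorize_menu_items (menu_items : List (List (String × String))) : Prop :=
  ∀ item ∈ menu_items, "category" ∈ item.map Prod.fst ∧ "name" ∈ item.map Prod.fst
instance (menu_items : List (List (String × String))) : Decidable (Pre_categorize_menu_items menu_items) := by unfold Pre_categorize_menu_items; infer_instance

def pvWitness_categorize_menu_items : (List (List (String × String))) :=
  [[("category", "mains"), ("name", "soup")], [("category", "mains"), ("name", "pie")]]

def Spec_categorize_menu_items (menu_items : List (List (String × String))) (out : List (String × List (List (String × String)))) : Prop := out = categorize_menu_items_alt menu_items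
instance (menu_items : List (List (String × String))) (out : List (String × List (List (String × String)))) : Decidable (Spec_categorize_menu_items menu_items out) := by unfold Spec_categorize_menu_items; infer_instance

-- ===== CLAIM (what is proved, stated in full; the proofs are below) =====
def Claim_equal_categorize_menu_items : Prop := ∀ (menu_items : List (List (String × String))), Dom_categorize_menu_items menu_items → Pre_categorize_menu_items menu_items → Spec_categorize_menu_items menu_items (categorize_menu_items menu_items)

-- ===== LEMMAS AND PROOFS =====

-- `if k ∉ d then d[k] = []` followed by append is a plain `modify`.
theorem stepA_eq_modify {ν : Type} (d : PySem.Dict String (List ν)) (c : String) (v : ν) :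
    (let d' := if d.contains c then d else d.insert c []
     d'.modify c [] (fun l => l ++ [v])) = d.modify c [] (fun l => l ++ [v]) := by
  by_cases h : d.contains c = true
  · simp [h]
  · simp only [h, if_false, Bool.false_eq_true]
    simp [PySem.Dict.modify, PySem.Dict.getD_insert_self, PySem.Dict.insert_insert_self,
      PySem.Dict.getD_of_not_contains d [] (by simpa using h)]

-- the comprehension {cat item : [] …} maps every key to []
theorem getD_init_nil (menu_items : List (List (String × String)))
    (d : PySem.Dict String (List (List (String × String)))) (h : ∀ c, d.getD c [] = []) (c : String) :
    (menu_items.foldl (fun d item => d.insert (pvItemGet item "category") []) d).getD c [] = [] := by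
  induction menu_items generalizing d with
  | nil => simpa using h c
  | cons x xs ih =>
      simp only [List.foldl_cons]
      exact ih _ (fun c' => by rw [PySem.Dict.getD_insert]; split <;> simp [h])

-- pairing each element with its key and projecting back is a filter
theorem map_snd_filter_fst {α : Type} (cat : α → String) (c : String) (l : List α) :
    List.map (fun p => p.2) (List.filter (fun p => p.1 == c) (l.map (fun x => (cat x, x))))
      = l.filter (fun x => cat x == c) := by
  induction l with
  | nil => rfl
  | cons x xs ih => by_cases h : cat x = c <;> simp [h, ih]

-- grouping folds compute a filter of the traversed list
theorem getD_group_fold (l : List (List (String × String)))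
    (d : PySem.Dict String (List (List (String × String)))) (c : String) :
    (l.foldl (fun d item => d.modify (pvItemGet item "category") [] (fun acc => acc ++ [item])) d).getD c []
      = d.getD c [] ++ l.filter (fun x => pvItemGet x "category" == c) := by
  have := PySem.Dict.getD_foldl_modify_append
    (l.map (fun x => (pvItemGet x "category", x))) d c
  simp only [List.foldl_map] at this
  rw [this, map_snd_filter_fst]

-- inserting below everything is a cons
theorem insertBy_all_before {α : Type} (b : α → α → Bool) (x : α) (ys : List α)
    (h : ∀ y ∈ ys, b x y = true) : PySem.List.insertBy b x ys = x :: ys := by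
  cases ys with
  | nil => rfl
  | cons y t => simp [PySem.List.insertBy, h y (by simp)]

-- insertion keeps the list sorted
theorem pairwise_insertBy {α κ : Type} [LinearOrder κ] (key : α → κ) (x : α) (ys : List α)
    (hs : ys.Pairwise (fun a b => key a ≤ key b)) :
    (PySem.List.insertBy (fun a b => decide (key a < key b)) x ys).Pairwise (fun a b => key a ≤ key b) := by
  induction ys with
  | nil => simp [PySem.List.insertBy]
  | cons y t ih =>
      rcases List.pairwise_cons.mp hs with ⟨hy, ht⟩
      by_cases h : key x < key y
      · simp only [PySem.List.insertBy, h, decide_true, if_true]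
        refine List.pairwise_cons.mpr ⟨?_, hs⟩
        intro z hz
        rcases List.mem_cons.mp hz with rfl | hz
        · exact le_of_lt h
        · exact le_trans (le_of_lt h) (hy z hz)
      · simp only [PySem.List.insertBy, h, decide_false, Bool.false_eq_true, if_false]
        refine List.pairwise_cons.mpr ⟨?_, ih ht⟩
        intro z hz
        rcases (PySem.List.mem_insertBy _ x z t).mp hz with rfl | hz
        · exact le_of_not_gt h
        · exact hy z hz

-- on a sorted list, filtering commutes with insertion
theorem filter_insertBy {α κ : Type} [LinearOrder κ] (key : α → κ) (p : α → Bool) (x : α)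
    (ys : List α) (hs : ys.Pairwise (fun a b => key a ≤ key b)) :
    (PySem.List.insertBy (fun a b => decide (key a < key b)) x ys).filter p
      = if p x then PySem.List.insertBy (fun a b => decide (key a < key b)) x (ys.filter p)
        else ys.filter p := by
  induction ys with
  | nil => cases h : p x <;> simp [PySem.List.insertBy, List.filter, h]
  | cons y t ih =>
      rcases List.pairwise_cons.mp hs with ⟨hy, ht⟩
      by_cases h : key x < key y
      · simp only [PySem.List.insertBy, h, decide_true, if_true]
        have hall : ∀ z ∈ (y :: t).filter p, (fun a b => decide (key a < key b)) x z = true := by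
          intro z hz
          have hz' := List.mem_of_mem_filter hz
          rcases List.mem_cons.mp hz' with rfl | hz'
          · simpa using h
          · exact decide_eq_true (lt_of_lt_of_le h (hy z hz'))
        rw [insertBy_all_before _ _ _ hall]
        cases hpx : p x <;> simp [List.filter, hpx]
      · simp only [PySem.List.insertBy, h, decide_false, Bool.false_eq_true, if_false]
        cases hpy : p y
        · simpa [List.filter_cons, hpy] using ih ht
        · simp only [List.filter_cons, hpy, if_true]
          rw [ih ht]
          cases hpx : p x
          · simp
          · simp [PySem.List.insertBy, h]

-- filtering commutes with the whole insertion-sort fold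
theorem filter_foldl_insertBy {α κ : Type} [LinearOrder κ] (key : α → κ) (p : α → Bool)
    (xs : List α) :
    ∀ acc, acc.Pairwise (fun a b => key a ≤ key b) →
      (xs.foldl (fun a x => PySem.List.insertBy (fun a b => decide (key a < key b)) x a) acc).filter p
        = (xs.filter p).foldl (fun a x => PySem.List.insertBy (fun a b => decide (key a < key b)) x a)
            (acc.filter p) := by
  induction xs with
  | nil => intro acc _; simp
  | cons x t ih =>
      intro acc hacc
      simp only [List.foldl_cons]
      rw [ih _ (pairwise_insertBy key x acc hacc), filter_insertBy key p x acc hacc]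
      cases hpx : p x <;> simp [hpx]

-- stability: the per-group sort equals filtering the globally sorted list
theorem sorted_filter {α κ : Type} [LinearOrder κ] (key : α → κ) (p : α → Bool) (xs : List α) :
    (PySem.List.sorted xs key false).filter p = PySem.List.sorted (xs.filter p) key false := by
  rw [PySem.List.sorted_eq_foldl_insertBy, PySem.List.sorted_eq_foldl_insertBy]
  simpa using filter_foldl_insertBy key p xs [] (by simp)

-- ===== VERDICT (by name: the statement is the Claim_ definition above) =====
theorem categorize_menu_items_spec : Claim_equal_categorize_menu_items := by
  intro mi _ _
  unfold Spec_categorize_menu_items categorize_menu_items categorize_menu_items_alt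
  set cat : List (String × String) → String := fun x => pvItemGet x "category" with hcat
  set nm : List (String × String) → String := fun x => pvItemGet x "name" with hnm
  -- A's fold is the plain grouping fold
  have hA : mi.foldl
      (fun d item =>
        let category := pvItemGet item "category"
        let d := if d.contains category then d else d.insert category []
        d.modify category [] (fun l => l ++ [item]))
      PySem.Dict.empty
      = mi.foldl (fun d item => d.modify (cat item) [] (fun l => l ++ [item])) PySem.Dict.empty := by
    refine PySem.List.foldl_congr_mem _ _ _ _ ?_
    intro d item _
    simpa using stepA_eq_modify d (pvItemGet item "category") item
  rw [hA]
  set dA := mi.foldl (fun d item => d.modify (cat item) [] (fun l => l ++ [item])) PySem.Dict.empty with hdA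
  set init := mi.foldl (fun d item => d.insert (pvItemGet item "category") []) PySem.Dict.empty with hinit
  set S := PySem.List.sorted mi nm false with hS
  set dB := S.foldl (fun d item => d.modify (pvItemGet item "category") [] (fun l => l ++ [item])) init with hdB
  -- keys
  have hkA : dA.keys = PySem.Set.ofList (mi.map cat) := by
    rw [hdA, PySem.Dict.keys_foldl_modify_key mi cat [] (fun d x => fun l => l ++ [x])]
    simp [PySem.Set.update, PySem.Set.ofList_eq_foldl]
  have hkI : init.keys = PySem.Set.ofList (mi.map cat) := by
    rw [hinit, PySem.Dict.keys_foldl_insert_key mi cat (fun _ _ => [])]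
    simp [PySem.Set.update, PySem.Set.ofList_eq_foldl]
  have hkB : dB.keys = PySem.Set.ofList (mi.map cat) := by
    rw [hdB, PySem.Dict.keys_foldl_modify_key S cat [] (fun d x => fun l => l ++ [x]), hkI]
    rw [PySem.Set.update_eq_append_filter]
    have : (PySem.Set.ofList (S.map cat)).filter
        (fun y => !(PySem.Set.ofList (mi.map cat)).contains y) = [] := by
      refine List.filter_eq_nil_iff.mpr (fun y hy => ?_)
      have hy' : y ∈ S.map cat := (PySem.Set.mem_ofList _ _).mp hy
      have : y ∈ mi.map cat := ((PySem.List.sorted_perm mi nm false).map cat).mem_iff.mp hy'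
      simp [PySem.Set.contains, (PySem.Set.mem_ofList _ _).mpr this]
    rw [this, List.append_nil]
  have hndA : dA.keys.Nodup := by
    rw [hdA]
    exact PySem.Dict.nodup_keys_foldl_modify_key mi cat [] _ _ (by simp)
  have hndB : dB.keys.Nodup := by
    rw [hdB]
    refine PySem.Dict.nodup_keys_foldl_modify_key S cat [] _ _ ?_
    rw [hinit]
    exact PySem.Dict.nodup_keys_foldl_insert_key mi cat _ _ (by simp)
  -- values
  have hvA : ∀ c, dA.getD c [] = mi.filter (fun x => cat x == c) := by
    intro c; rw [hdA]
    simpa using getD_group_fold mi PySem.Dict.empty c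
  have hvB : ∀ c, dB.getD c [] = S.filter (fun x => cat x == c) := by
    intro c; rw [hdB]
    rw [getD_group_fold S init c, hinit, getD_init_nil mi PySem.Dict.empty (by simp) c]
    rfl
  rw [PySem.Dict.items_eq_map_keys dA hndA [], PySem.Dict.items_eq_map_keys dB hndB [],
    hkA, hkB, List.map_map]
  refine List.map_congr_left (fun c _ => ?_)
  simp only [Function.comp]
  rw [hvA c, hvB c, hS, sorted_filter nm (fun x => cat x == c) mi]
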